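-- pv_equiv track=rewrite | github.com/vacantmemory/warehouseSystem | system/views.py | store
-- ===== SOURCE A (Python) =====
-- def store(x, y, pid):
--     shelf = {}
--     for i in range(len(x)):
--         #
--         x_str = judge(x[i])
--         y_str = judge(y[i])
--         #
--         key = x_str + y_str
--         if key in list(shelf.keys()):
--             shelf[key].append(pid[i])
--         else:
--             shelf[key] = [pid[i]]
--
--     return shelf
--
-- def judge(e):
--     if e < 10:
--         tr = '0' + str(e)
--     else:
--         tr = str(e)
--     return tr
-- ===== SOURCE B (Python) =====
-- def judge(e):
--     s = str(e)
--     return s if e >= 10 else '0' + s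
--
-- def store(x, y, pid):
--     keys = [judge(x[i]) + judge(y[i]) for i in range(len(x))]
--     return {k: [p for k2, p in zip(keys, pid) if k2 == k]
--             for k in dict.fromkeys(keys)}
-- ===== Notes on version B (the rewrite author's own statement) =====
-- stated objective: simpler
-- what changed: A builds the dict incrementally, scanning a materialized list of its keys each iteration to choose append-vs-insert; B never mutates a dict: it precomputes the key list once and builds the result as a comprehension that, for each distinct key in first-occurrence order, filters the zipped (key, pid) pairs.
import Mathlib
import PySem

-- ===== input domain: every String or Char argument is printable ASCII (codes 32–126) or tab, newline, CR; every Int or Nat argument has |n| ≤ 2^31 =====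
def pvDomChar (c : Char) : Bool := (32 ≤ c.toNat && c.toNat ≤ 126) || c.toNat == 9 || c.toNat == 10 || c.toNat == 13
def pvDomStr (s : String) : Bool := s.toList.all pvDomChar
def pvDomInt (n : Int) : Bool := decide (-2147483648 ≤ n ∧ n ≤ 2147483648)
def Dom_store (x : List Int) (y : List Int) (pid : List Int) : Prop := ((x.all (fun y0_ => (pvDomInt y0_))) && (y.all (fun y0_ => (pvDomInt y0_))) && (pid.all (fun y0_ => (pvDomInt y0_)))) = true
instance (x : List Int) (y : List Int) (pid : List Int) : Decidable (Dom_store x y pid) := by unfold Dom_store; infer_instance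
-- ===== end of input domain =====

-- B builds no dict incrementally: it precomputes the key list and groups the pids by a
-- per-distinct-key filter of the zipped (key, pid) pairs (objective: simpler); neither
-- version mutates its arguments.

-- ===== PORT A =====
-- helper `judge` of A
def judge (e : Int) : String :=
  if e < 10 then "0" ++ PySem.Int.toStr e else PySem.Int.toStr e

-- `x[i]` with 0 ≤ i < len(x) is always in range; `y[i]`/`pid[i]` are in range under
-- Pre_store, so pyGetD is exact on every admitted input.
def store (x : List Int) (y : List Int) (pid : List Int) : List (String × List Int) :=
  ((PySem.List.pyRange 0 (x.length : Int) 1).foldl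
    (fun (shelf : PySem.Dict String (List Int)) i =>
      let x_str := judge (PySem.List.pyGetD x i 0)
      let y_str := judge (PySem.List.pyGetD y i 0)
      let key := x_str ++ y_str
      if (shelf.keys).contains key then
        -- shelf[key].append(pid[i]) : key is present (guarded), so modify with default [] is exact
        shelf.modify key [] (fun l => l ++ [PySem.List.pyGetD pid i 0])
      else
        shelf.insert key [PySem.List.pyGetD pid i 0])
    PySem.Dict.empty).items

-- ===== PORT B =====
def judgeB (e : Int) : String :=
  if e ≥ 10 then PySem.Int.toStr e else "0" ++ PySem.Int.toStr e

-- keys = [...]; {k: [p for k2, p in zip(keys, pid) if k2 == k] for k in dict.fromkeys(keys)}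
-- (dict.fromkeys = PySem.List.dedup; the comprehension's keys are distinct, so the dict's
-- items are exactly this map, in first-occurrence order)
def store_alt (x : List Int) (y : List Int) (pid : List Int) : List (String × List Int) :=
  let keys := (PySem.List.pyRange 0 (x.length : Int) 1).map
    (fun i => judgeB (PySem.List.pyGetD x i 0) ++ judgeB (PySem.List.pyGetD y i 0))
  (PySem.List.dedup keys).map
    (fun k => (k, ((keys.zip pid).filter (fun kp => kp.1 == k)).map Prod.snd))

-- ===== PRECONDITION & SPEC =====
-- Pre_store excludes exactly the inputs where A raises IndexError: y or pid shorter than x.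
def Pre_store (x : List Int) (y : List Int) (pid : List Int) : Prop :=
  x.length ≤ y.length ∧ x.length ≤ pid.length
instance (x : List Int) (y : List Int) (pid : List Int) : Decidable (Pre_store x y pid) := by
  unfold Pre_store; infer_instance

def pvWitness_store : List Int × List Int × List Int := ([4, 12], [5, 6], [7, 8])

def Spec_store (x : List Int) (y : List Int) (pid : List Int) (out : List (String × List Int)) : Prop := out = store_alt x y pid
instance (x : List Int) (y : List Int) (pid : List Int) (out : List (String × List Int)) : Decidable (Spec_store x y pid out) := by unfold Spec_store; infer_instance

-- ===== CLAIM (what is proved, stated in full; the proofs are below) =====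
def Claim_equal_store : Prop := ∀ (x : List Int) (y : List Int) (pid : List Int), Dom_store x y pid → Pre_store x y pid → Spec_store x y pid (store x y pid)

-- ===== LEMMAS AND PROOFS =====

theorem judgeB_eq (e : Int) : judgeB e = judge e := by
  by_cases h : e < 10 <;> simp [judge, judgeB, h]

-- A's loop body equals a plain `modify` step: when the key is absent,
-- modify k [] (· ++ [p]) inserts ([] ++ [p]) = [p].
theorem stepA_eq_stepM (d : PySem.Dict String (List Int)) (k : String) (p : Int) :
    (if (d.keys).contains k then d.modify k [] (fun l => l ++ [p])
     else d.insert k [p])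
    = d.modify k [] (fun l => l ++ [p]) := by
  by_cases h : (d.keys).contains k = true
  · rw [if_pos h]
  · rw [if_neg h]
    unfold PySem.Dict.modify
    have hc : d.contains k = false := by
      rw [PySem.Dict.contains_eq_decide_mem_keys]
      simpa using h
    rw [PySem.Dict.getD_of_not_contains]
    · simp
    · exact hc

-- the common (key, pid) pair list
def pairsOf (x y pid : List Int) : List (String × Int) :=
  (PySem.List.pyRange 0 (x.length : Int) 1).map
    (fun i => (judge (PySem.List.pyGetD x i 0) ++ judge (PySem.List.pyGetD y i 0),
               PySem.List.pyGetD pid i 0))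

def stepM (d : PySem.Dict String (List Int)) (kp : String × Int) : PySem.Dict String (List Int) :=
  d.modify kp.1 [] (fun l => l ++ [kp.2])

-- CHARACTERISATION of A's fold: its items are, key by distinct key, the key together
-- with the pids of the pairs carrying that key.
theorem stepM_eq : stepM = fun (d : PySem.Dict String (List Int)) (kp : String × Int) =>
    d.modify kp.1 [] (fun l => l ++ [kp.2]) := rfl

theorem foldl_stepM_items (ps : List (String × Int)) :
    (ps.foldl stepM PySem.Dict.empty).items
      = (PySem.List.dedup (ps.map Prod.fst)).map
          (fun k => (k, (ps.filter (fun kp => kp.1 == k)).map Prod.snd)) := by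
  have hkeys : (ps.foldl stepM PySem.Dict.empty).keys = PySem.List.dedup (ps.map Prod.fst) := by
    rw [stepM_eq]
    rw [PySem.Dict.keys_foldl_modify_key (l := ps) (key := Prod.fst) (d0 := ([] : List Int))
      (f := fun d kp l => l ++ [kp.2]) (d := PySem.Dict.empty)]
    simp [PySem.Dict.keys_empty, PySem.Set.update_nil_left]
  have hnd : (ps.foldl stepM PySem.Dict.empty).keys.Nodup := by
    rw [hkeys]; exact PySem.List.nodup_dedup _
  rw [PySem.Dict.items_eq_map_keys _ hnd ([] : List Int), hkeys]
  apply List.map_congr_left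
  intro k _
  rw [stepM_eq]
  rw [PySem.Dict.getD_foldl_modify_append (l := ps) (d := PySem.Dict.empty) (c := k),
    PySem.Dict.getD_empty]
  simp

theorem store_eq_pairs (x y pid : List Int) :
    store x y pid = ((pairsOf x y pid).foldl stepM PySem.Dict.empty).items := by
  unfold store pairsOf
  rw [List.foldl_map]
  have hf : (fun (shelf : PySem.Dict String (List Int)) (i : Int) =>
      let x_str := judge (PySem.List.pyGetD x i 0)
      let y_str := judge (PySem.List.pyGetD y i 0)
      let key := x_str ++ y_str
      if (shelf.keys).contains key then
        shelf.modify key [] (fun l => l ++ [PySem.List.pyGetD pid i 0])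
      else
        shelf.insert key [PySem.List.pyGetD pid i 0])
      = (fun (shelf : PySem.Dict String (List Int)) (i : Int) =>
          stepM shelf (judge (PySem.List.pyGetD x i 0) ++ judge (PySem.List.pyGetD y i 0),
            PySem.List.pyGetD pid i 0)) := by
    funext d i
    exact stepA_eq_stepM d _ _
  rw [hf]

theorem pairs_zip (x y pid : List Int) (hp : x.length ≤ pid.length) :
    ((pairsOf x y pid).map Prod.fst).zip pid = pairsOf x y pid := by
  have hlen : ((pairsOf x y pid).map Prod.fst).length = x.length := by
    simp [pairsOf, PySem.List.length_pyRange_one]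
  apply List.ext_getElem
  · simp only [List.length_zip, hlen]
    have : (pairsOf x y pid).length = x.length := by
      simp [pairsOf, PySem.List.length_pyRange_one]
    omega
  · intro n h1 h2
    rw [List.getElem_zip]
    have hnx : n < x.length := by
      rw [List.length_zip, hlen] at h1
      omega
    have hpr : n < (PySem.List.pyRange 0 (x.length : Int) 1).length := by
      simpa [PySem.List.length_pyRange_one] using hnx
    simp only [pairsOf, List.getElem_map, PySem.List.getElem_pyRange_one, zero_add]
    rw [PySem.List.pyGetD_natCast]
    have hnp : n < pid.length := by omega
    congr 1
    exact ((PySem.List.pyGetD_natCast pid n 0).trans (List.getD_eq_getElem pid 0 hnp)).symm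

theorem store_alt_eq_pairs (x y pid : List Int) (hp : x.length ≤ pid.length) :
    store_alt x y pid
      = (PySem.List.dedup ((pairsOf x y pid).map Prod.fst)).map
          (fun k => (k, ((pairsOf x y pid).filter (fun kp => kp.1 == k)).map Prod.snd)) := by
  have hkeys : (PySem.List.pyRange 0 (x.length : Int) 1).map
      (fun i => judgeB (PySem.List.pyGetD x i 0) ++ judgeB (PySem.List.pyGetD y i 0))
      = (pairsOf x y pid).map Prod.fst := by
    unfold pairsOf
    rw [List.map_map]
    apply List.map_congr_left
    intro i _
    simp [judgeB_eq]
  unfold store_alt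
  simp only [hkeys, pairs_zip x y pid hp]

-- ===== VERDICT (by name: the statement is the Claim_ definition above) =====
theorem store_spec : Claim_equal_store := by
  intro x y pid _ hpre
  unfold Spec_store
  rw [store_eq_pairs, store_alt_eq_pairs x y pid hpre.2, foldl_stepM_items]
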